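-- pv_equiv track=rewrite | github.com/laurafernandezdiaz/EnsembleResults | code/CombineGS/FSCriterium.py | _copyFilter
-- ===== SOURCE A (Python) =====
-- def _copyFilter(NoUsed,MinW):
--     iMin=0
--     W=[0]*len(NoUsed)
--     for i in range(len(NoUsed)):
--         if not NoUsed[i]:
--             W[i]=MinW[iMin]
--             iMin=iMin+1
--     return W
-- ===== SOURCE B (Python) =====
-- def _copyFilter(NoUsed, MinW):
--     # Stack-based single forward pass: reverse MinW once so the next value to
--     # place is always on top of a stack, then build the output by appending --
--     # no index arithmetic, no preallocated array, no running counter.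
--     vals = MinW[::-1]
--     W = []
--     for used in NoUsed:
--         W.append(0 if used else vals.pop())
--     return W
-- ===== Notes on version B (the rewrite author's own statement) =====
-- stated objective: alternative
-- what changed: Replaces A's index-scatter into a preallocated zero array driven by a running counter with a stream/stack algorithm: MinW is reversed once into a stack and the output is built forwards by appending, popping the stack at each falsy slot; no indices or counters are kept.
import Mathlib
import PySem

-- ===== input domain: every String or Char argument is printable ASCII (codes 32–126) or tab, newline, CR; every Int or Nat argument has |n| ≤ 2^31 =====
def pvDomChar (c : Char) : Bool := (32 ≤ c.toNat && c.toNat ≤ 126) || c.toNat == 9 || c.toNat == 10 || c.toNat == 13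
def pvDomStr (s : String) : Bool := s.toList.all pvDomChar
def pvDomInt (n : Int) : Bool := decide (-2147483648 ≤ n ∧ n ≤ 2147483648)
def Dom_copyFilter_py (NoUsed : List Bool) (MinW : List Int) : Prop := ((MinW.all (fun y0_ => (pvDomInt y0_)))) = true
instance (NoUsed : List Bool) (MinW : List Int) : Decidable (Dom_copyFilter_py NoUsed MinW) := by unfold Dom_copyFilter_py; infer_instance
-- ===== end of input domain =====

-- B replaces A's counter-driven index-scatter into a preallocated array by a
-- stack/stream pass: reverse MinW once, then build the output forwards,
-- popping the stack at each falsy slot (alternative decomposition, same cost).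

-- ===== PORT A =====
def copyFilter_py (NoUsed : List Bool) (MinW : List Int) : List Int :=
  let iMin : Int := 0
  let W : List Int := List.replicate NoUsed.length (0 : Int)
  let st := (PySem.List.pyRange 0 NoUsed.length 1).foldl
    (fun (st : Int × List Int) i =>
      if !(PySem.List.pyGetD NoUsed i true) then
        (st.1 + 1, st.2.set i.toNat (PySem.List.pyGetD MinW st.1 0))
      else st) (iMin, W)
  st.2

-- ===== PORT B =====
-- state = (vals stack, output so far); vals.pop() = take the stack's last
-- element (getLastD 0 is exact inside Pre_, where the stack is never empty).
def copyFilter_py_alt (NoUsed : List Bool) (MinW : List Int) : List Int :=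
  let vals : List Int := MinW.reverse
  let st := NoUsed.foldl
    (fun (st : List Int × List Int) used =>
      if used then (st.1, st.2 ++ [(0 : Int)])
      else (st.1.dropLast, st.2 ++ [st.1.getLastD 0])) (vals, [])
  st.2

-- ===== PRECONDITION & SPEC =====
-- Pre_ excludes exactly the inputs where the Python A raises IndexError:
-- MinW shorter than the number of falsy slots (B's Python raises there too).
def Pre_copyFilter_py (NoUsed : List Bool) (MinW : List Int) : Prop :=
  NoUsed.count false ≤ MinW.length
instance (NoUsed : List Bool) (MinW : List Int) : Decidable (Pre_copyFilter_py NoUsed MinW) := by unfold Pre_copyFilter_py; infer_instance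
def pvWitness_copyFilter_py : List Bool × List Int := ([false, true, false], [3, 4])
def Spec_copyFilter_py (NoUsed : List Bool) (MinW : List Int) (out : List Int) : Prop := out = copyFilter_py_alt NoUsed MinW
instance (NoUsed : List Bool) (MinW : List Int) (out : List Int) : Decidable (Spec_copyFilter_py NoUsed MinW out) := by unfold Spec_copyFilter_py; infer_instance

-- ===== CLAIM =====
def Claim_equal_copyFilter_py : Prop := ∀ (NoUsed : List Bool) (MinW : List Int), Dom_copyFilter_py NoUsed MinW → Pre_copyFilter_py NoUsed MinW → Spec_copyFilter_py NoUsed MinW (copyFilter_py NoUsed MinW)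

-- ===== LEMMAS AND PROOFS =====
-- Common recursive characterisation: walk the mask, streaming values off MinW.
def pvG : List Bool → List Int → List Int
  | [], _ => []
  | true :: m, vs => 0 :: pvG m vs
  | false :: m, vs => vs.headD 0 :: pvG m vs.tail

-- A's loop step.
def pvStepA (m : List Bool) (MinW : List Int) (st : Int × List Int) (i : Int) : Int × List Int :=
  if !(PySem.List.pyGetD m i true) then
    (st.1 + 1, st.2.set i.toNat (PySem.List.pyGetD MinW st.1 0))
  else st

theorem pv_range_shift (n : Nat) :
    PySem.List.pyRange 1 ((n : Int) + 1) 1 = (PySem.List.pyRange 0 n 1).map (fun k => k + 1) := by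
  simp only [PySem.List.pyRange_one, List.map_map]
  rw [show ((n : Int) + 1 - 1).toNat = ((n : Int) - 0).toNat by omega]
  exact List.map_congr_left (fun k _ => by simp [Function.comp]; ring)

-- Folding A's step over shifted indices on a cons list keeps the head fixed.
theorem pv_fold_shift (b : Bool) (m : List Bool) (MinW : List Int) :
    ∀ (ks : List Int), (∀ k ∈ ks, 0 ≤ k) → ∀ (c h : Int) (W : List Int),
      (ks.map (fun k => k + 1)).foldl (pvStepA (b :: m) MinW) (c, h :: W)
        = ((ks.foldl (pvStepA m MinW) (c, W)).1,
           h :: (ks.foldl (pvStepA m MinW) (c, W)).2) := by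
  intro ks
  induction ks with
  | nil => intro _ c h W; simp
  | cons k ks ih =>
    intro hpos c h W
    have hk : 0 ≤ k := hpos k (by simp)
    have hrest : ∀ x ∈ ks, 0 ≤ x := fun x hx => hpos x (by simp [hx])
    simp only [List.map_cons, List.foldl_cons]
    have hget : PySem.List.pyGetD (b :: m) (k + 1) true = PySem.List.pyGetD m k true := by
      rw [PySem.List.pyGetD_of_nonneg _ _ (by omega : (0:Int) ≤ k + 1),
        PySem.List.pyGetD_of_nonneg _ _ hk,
        show (k + 1).toNat = k.toNat + 1 by omega]
      simp [List.getD]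
    have htoNat : (k + 1).toNat = k.toNat + 1 := by omega
    by_cases hc : PySem.List.pyGetD m k true
    · simp only [pvStepA, hget, hc, Bool.not_true]
      rw [if_neg (by simp), if_neg (by simp)]
      exact ih hrest _ _ _
    · simp only [pvStepA, hget, Bool.not_eq_true] at hc ⊢
      rw [hc]
      simp only [Bool.not_false]
      rw [if_pos trivial, if_pos trivial, htoNat, List.set_cons_succ]
      exact ih hrest _ _ _

theorem pv_A_eq_g (m : List Bool) : ∀ (MinW : List Int) (c : Int), 0 ≤ c →
    ((PySem.List.pyRange 0 (m.length : Int) 1).foldl (pvStepA m MinW)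
        (c, List.replicate m.length (0 : Int))).2
      = pvG m (MinW.drop c.toNat) := by
  induction m with
  | nil => intro MinW c _; simp [PySem.List.pyRange_one_eq_nil, pvG]
  | cons b m ih =>
    intro MinW c hc
    have hcons : PySem.List.pyRange 0 ((b :: m).length : Int) 1
        = 0 :: PySem.List.pyRange 1 ((m.length : Int) + 1) 1 := by
      have := PySem.List.pyRange_one_cons (a := 0) (b := ((b :: m).length : Int))
        (by simp)
      simpa using this
    rw [hcons, List.foldl_cons]
    have hget0 : PySem.List.pyGetD (b :: m) 0 true = b := by
      simp [PySem.List.pyGetD, PySem.List.pyGet?, PySem.List.pyIdx?]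
    cases b with
    | true =>
      simp only [pvStepA, hget0, Bool.not_true]
      rw [if_neg (by simp)]

      rw [List.length_cons, List.replicate_succ, pv_range_shift,
        pv_fold_shift _ _ _ _ (fun k hk => (PySem.List.mem_pyRange_one.mp hk).1)]
      simp [pvG, ih MinW c hc]
    | false =>
      simp only [pvStepA, hget0, Bool.not_false]
      rw [if_pos trivial]
      rw [List.length_cons, List.replicate_succ]
      simp only [Int.toNat_zero, List.set_cons_zero]
      rw [pv_range_shift, pv_fold_shift _ _ _ _ (fun k hk => (PySem.List.mem_pyRange_one.mp hk).1)]
      have hval : PySem.List.pyGetD MinW c 0 = (MinW.drop c.toNat).headD 0 := by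
        rw [PySem.List.pyGetD_of_nonneg _ _ hc]
        cases hlt : MinW[c.toNat]? with
        | none =>
          have hlen : MinW.length ≤ c.toNat := by
            rcases Nat.lt_or_ge c.toNat MinW.length with h | h
            · simp [List.getElem?_eq_getElem h] at hlt
            · exact h
          simp [List.getD, hlt, List.drop_eq_nil_of_le hlen]
        | some v =>
          have : (MinW.drop c.toNat).head? = some v := by
            rw [List.head?_drop]; exact hlt
          simp [List.getD, hlt, List.headD_eq_head?_getD, this]
      have htail : (MinW.drop c.toNat).tail = MinW.drop (c + 1).toNat := by
        rw [List.tail_drop]; congr 1; omega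
      rw [ih MinW (c + 1) (by omega)]
      simp [pvG, hval, htail]

theorem pv_B_eq_g (m : List Bool) : ∀ (vs out : List Int),
    (m.foldl (fun (st : List Int × List Int) used =>
        if used then (st.1, st.2 ++ [(0 : Int)])
        else (st.1.dropLast, st.2 ++ [st.1.getLastD 0])) (vs.reverse, out)).2
      = out ++ pvG m vs := by
  induction m with
  | nil => intro vs out; simp [pvG]
  | cons b m ih =>
    intro vs out
    cases b with
    | true =>
      simp only [List.foldl_cons]
      rw [if_pos trivial, ih vs (out ++ [0])]
      simp [pvG]
    | false =>
      simp only [List.foldl_cons]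
      rw [if_neg (by simp)]
      have h1 : vs.reverse.dropLast = vs.tail.reverse := by
        cases vs <;> simp
      have h2 : vs.reverse.getLastD 0 = vs.headD 0 := by
        cases vs <;> simp
      rw [h1, h2]
      have := ih vs.tail (out ++ [vs.headD 0])
      rw [this]
      simp [pvG]

-- ===== VERDICT =====
theorem copyFilter_py_spec : Claim_equal_copyFilter_py := by
  intro NoUsed MinW _ _
  unfold Spec_copyFilter_py copyFilter_py copyFilter_py_alt
  simp only []
  rw [show (fun (st : Int × List Int) i =>
      if !(PySem.List.pyGetD NoUsed i true) then
        (st.1 + 1, st.2.set i.toNat (PySem.List.pyGetD MinW st.1 0))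
      else st) = pvStepA NoUsed MinW from rfl]
  rw [pv_A_eq_g NoUsed MinW 0 le_rfl, pv_B_eq_g NoUsed MinW []]
  simp
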